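-- pv_equiv track=rewrite | github.com/satrya070/aoc2021 | code/day_16.py | group_counter
-- ===== SOURCE A (Python) =====
-- def group_counter(groups):
--     total_groups = 1
--
--     if groups[0] == '0':
--         return total_groups
--
--     for k, i in enumerate(groups):
--         if (k+1) % 5 == 0:
--             if groups[k+1] == '1':
--                 total_groups += 1
--             else:
--                 break
--
--     return total_groups
-- ===== SOURCE B (Python) =====
-- def group_counter(groups):
--     if groups[0] == '0':
--         return 1
--     count = 1
--     j = 5
--     while j < len(groups) and groups[j] == '1':
--         count += 1
--         j += 5
--     return count
-- ===== Notes on version B (the rewrite author's own statement) =====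
-- stated objective: simpler
-- what changed: B strides directly over the group-prefix positions 5,10,15,... with a single while-loop condition, instead of enumerating every character and gating on (k+1) % 5 == 0 inside the loop.
-- crash fix: On non-empty strings not starting with '0' whose length is a multiple of 5 and whose prefix positions 5,10,...,len-5 are all '1', A raises IndexError reading groups[len]; B returns the count of those all-'1' groups (e.g. '11111' -> 1). — e.g. on group_counter("11111"): A raises IndexError, B returns 1
import Mathlib
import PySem

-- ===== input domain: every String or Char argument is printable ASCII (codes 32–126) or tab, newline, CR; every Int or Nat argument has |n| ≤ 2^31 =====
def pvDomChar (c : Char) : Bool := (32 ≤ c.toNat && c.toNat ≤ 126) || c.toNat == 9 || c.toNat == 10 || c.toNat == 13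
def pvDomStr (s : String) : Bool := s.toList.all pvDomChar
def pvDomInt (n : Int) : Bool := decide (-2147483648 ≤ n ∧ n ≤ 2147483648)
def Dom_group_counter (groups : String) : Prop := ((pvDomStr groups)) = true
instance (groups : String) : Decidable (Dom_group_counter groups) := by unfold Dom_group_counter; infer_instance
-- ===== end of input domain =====

-- B is a plainer decomposition: it walks only the prefix positions 5,10,... instead of
-- enumerating every character with a modulo gate.  Equivalence is claimed on Pre_ (inputs
-- where A returns normally); return-value equivalence only (neither program mutates input).

-- ===== PORT A =====
-- for-loop over enumerate(groups): k is the index; 0 is the junk value on the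
-- IndexError path at groups[k+1] (excluded by Pre_group_counter).
def gcA_loop (s : List Char) (k : Nat) (total : Int) : Int :=
  if _h : k < s.length then
    if (k + 1) % 5 = 0 then
      match PySem.List.pyGet? s ((k : Int) + 1) with
      | none => 0
      | some c => if c = '1' then gcA_loop s (k + 1) (total + 1) else total
    else gcA_loop s (k + 1) total
  else total
termination_by s.length - k

def group_counter (groups : String) : Int :=
  match PySem.List.pyGet? groups.toList 0 with
  | none => 0  -- groups[0] raises IndexError on the empty string (excluded by Pre_)
  | some c => if c = '0' then 1 else gcA_loop groups.toList 0 1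

-- ===== PORT B =====
-- while j < len(groups) and groups[j] == '1': count += 1; j += 5
def gcB_loop (s : List Char) (j : Nat) (count : Int) : Int :=
  if _h : j < s.length then
    if s.getD j ' ' = '1' then gcB_loop s (j + 5) (count + 1) else count
  else count
termination_by s.length - j

def group_counter_alt (groups : String) : Int :=
  match PySem.List.pyGet? groups.toList 0 with
  | none => 0  -- groups[0] raises IndexError on the empty string (excluded by Pre_)
  | some c => if c = '0' then 1 else gcB_loop groups.toList 5 1

-- ===== PRECONDITION & SPEC =====
-- Pre_ excludes the empty string (groups[0] raises in both A and B) and the strings where A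
-- raises IndexError reading groups[len]: first char ≠ '0', length a positive multiple of 5,
-- and every prefix position 5,10,...,len-5 holds '1'.
def Pre_group_counter (groups : String) : Prop :=
  groups.toList ≠ [] ∧
  ¬ (groups.toList.headD ' ' ≠ '0' ∧ groups.toList.length % 5 = 0 ∧
      ∀ j ∈ List.range (groups.toList.length / 5), 1 ≤ j →
        groups.toList.getD (5 * j) ' ' = '1')
instance (groups : String) : Decidable (Pre_group_counter groups) := by
  unfold Pre_group_counter; infer_instance

def pvWitness_group_counter : String := "110101"

-- On these inputs A raises IndexError (reading groups[len]) while B returns the count of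
-- the consecutive all-'1' groups.
def Raises_group_counter (groups : String) : Prop :=
  groups.toList ≠ [] ∧ groups.toList.headD ' ' ≠ '0' ∧ groups.toList.length % 5 = 0 ∧
  ∀ j ∈ List.range (groups.toList.length / 5), 1 ≤ j →
    groups.toList.getD (5 * j) ' ' = '1'
instance (groups : String) : Decidable (Raises_group_counter groups) := by
  unfold Raises_group_counter; infer_instance

def pvRaiseWitness_group_counter : String := "11111"
def pvRaiseWitnessOut_group_counter : Int := 1

def Spec_group_counter (groups : String) (out : Int) : Prop := out = group_counter_alt groups
instance (groups : String) (out : Int) : Decidable (Spec_group_counter groups out) := by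
  unfold Spec_group_counter; infer_instance

-- ===== CLAIM (what is proved, stated in full; the proofs are below) =====
def Claim_equal_group_counter : Prop := ∀ (groups : String), Dom_group_counter groups → Pre_group_counter groups → Spec_group_counter groups (group_counter groups)
def Claim_raises_group_counter : Prop := (∀ (groups : String), Dom_group_counter groups → Raises_group_counter groups → ¬ Pre_group_counter groups) ∧ (Dom_group_counter (pvRaiseWitness_group_counter) ∧ Raises_group_counter (pvRaiseWitness_group_counter) ∧ group_counter_alt (pvRaiseWitness_group_counter) = pvRaiseWitnessOut_group_counter)

-- ===== LEMMAS AND PROOFS =====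

-- A's loop from position k equals B's loop started at the next multiple of 5 after k,
-- provided a break position (or a non-multiple-of-5 length) lies strictly ahead of k.
theorem gcA_loop_eq_gcB_loop (s : List Char) : ∀ (m k : Nat) (total : Int),
    s.length - k ≤ m →
    (s.length % 5 ≠ 0 ∨ ∃ i, k < 5 * i ∧ 5 * i < s.length ∧ s.getD (5 * i) ' ' ≠ '1') →
    gcA_loop s k total = gcB_loop s (5 * (k / 5 + 1)) total := by
  intro m
  induction m with
  | zero =>
    intro k total hm _
    rw [gcA_loop, gcB_loop]
    have h1 : ¬ k < s.length := by omega
    have h2 : ¬ 5 * (k / 5 + 1) < s.length := by omega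
    simp [h1, h2]
  | succ m ih =>
    intro k total _hm hH
    by_cases hk : k < s.length
    · rw [gcA_loop]
      simp only [hk, dif_pos]
      by_cases h5 : (k + 1) % 5 = 0
      · -- trigger position: A reads s[k+1]
        rw [if_pos h5]
        have hkn : k + 1 < s.length := by
          rcases hH with h | ⟨i, hi1, hi2, _⟩
          · omega
          · omega
        have hget : PySem.List.pyGet? s ((k : Int) + 1) = some s[k + 1] := by
          have : ((k : Int) + 1) = ((k + 1 : Nat) : Int) := by push_cast; ring
          rw [this, PySem.List.pyGet?_natCast, List.getElem?_eq_getElem hkn]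
        rw [hget]
        have hj : 5 * (k / 5 + 1) = k + 1 := by omega
        rw [hj, gcB_loop]
        simp only [hkn, dif_pos]
        have hgetD : s.getD (k + 1) ' ' = s[k + 1] := List.getD_eq_getElem s ' ' hkn
        rw [hgetD]
        by_cases hc : s[k + 1] = '1'
        · rw [if_pos hc, if_pos hc]
          have step := ih (k + 1) (total + 1) (by omega) ?_
          · rw [step]
            have : 5 * ((k + 1) / 5 + 1) = k + 1 + 5 := by omega
            rw [this]
          · rcases hH with h | ⟨i, hi1, hi2, hi3⟩
            · exact Or.inl h
            · refine Or.inr ⟨i, ?_, hi2, hi3⟩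
              have : 5 * i ≠ k + 1 := by
                intro he
                rw [he] at hi3
                rw [List.getD_eq_getElem s ' ' hkn] at hi3
                exact hi3 hc
              omega
        · rw [if_neg hc, if_neg hc]
      · -- non-trigger: A just advances
        rw [if_neg h5]
        have step := ih (k + 1) total (by omega) ?_
        · rw [step]
          have : (k + 1) / 5 = k / 5 := by omega
          rw [this]
        · rcases hH with h | ⟨i, hi1, hi2, hi3⟩
          · exact Or.inl h
          · refine Or.inr ⟨i, ?_, hi2, hi3⟩
            have : 5 * i ≠ k + 1 := by omega
            omega
    · rw [gcA_loop, gcB_loop]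
      have h2 : ¬ 5 * (k / 5 + 1) < s.length := by omega
      simp [hk, h2]

-- ===== VERDICT (by name: the statements are the Claim_ definitions above) =====
theorem group_counter_spec : Claim_equal_group_counter := by
  intro g _ hpre
  unfold Spec_group_counter group_counter group_counter_alt
  obtain ⟨hne, hnr⟩ := hpre
  cases hs : g.toList with
  | nil => exact absurd hs hne
  | cons c rest =>
    rw [hs] at hnr
    rw [PySem.List.pyGet?_zero_cons]
    show (if c = '0' then (1 : Int) else gcA_loop (c :: rest) 0 1) =
      if c = '0' then (1 : Int) else gcB_loop (c :: rest) 5 1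
    by_cases hc : c = '0'
    · rw [if_pos hc, if_pos hc]
    · rw [if_neg hc, if_neg hc]
      have hH : (c :: rest).length % 5 ≠ 0 ∨
          ∃ i, 0 < 5 * i ∧ 5 * i < (c :: rest).length ∧
            (c :: rest).getD (5 * i) ' ' ≠ '1' := by
        by_cases h5 : (c :: rest).length % 5 = 0
        · push_neg at hnr
          obtain ⟨j, hjmem, hj1, hjne⟩ := hnr hc h5
          rw [List.mem_range] at hjmem
          exact Or.inr ⟨j, by omega, by omega, hjne⟩
        · exact Or.inl h5
      have := gcA_loop_eq_gcB_loop (c :: rest) (c :: rest).length 0 1 (by omega) hH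
      rw [this]

theorem group_counter_raises : Claim_raises_group_counter := by
  unfold Claim_raises_group_counter
  constructor
  · intro g _ hr hp
    exact hp.2 ⟨hr.2.1, hr.2.2.1, hr.2.2.2⟩
  · refine ⟨by decide, by decide, ?_⟩
    simp [group_counter_alt, pvRaiseWitness_group_counter, pvRaiseWitnessOut_group_counter,
      gcB_loop, PySem.List.pyGet?, PySem.List.pyIdx?]

-- self-check: the raise witness indeed falls outside Pre_ (via the first half of the claim)
theorem group_counter_raises_witness_ok : ¬ Pre_group_counter pvRaiseWitness_group_counter :=
  group_counter_raises.1 pvRaiseWitness_group_counter (by decide) (by decide)
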